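-- pv_equiv track=rewrite | github.com/vosslab/biology-problems | problems/inheritance-problems/pedigrees/pedigree_lib/genetic_assignment.py | _autosomal_parent_possible
-- ===== SOURCE A (Python) =====
-- AUTOSOMAL_ALLELES = ('A', 'a')
--
-- def _canonical_pair(
-- 	allele_a: str,
-- 	allele_b: str,
-- 	allele_order: tuple,
-- ) -> tuple:
-- 	if allele_a == allele_b:
-- 		return (allele_a, allele_b)
-- 	order_map = {
-- 		allele_order[0]: 0,
-- 		allele_order[1]: 1,
-- 	}
-- 	if order_map[allele_a] <= order_map[allele_b]:
-- 		return (allele_a, allele_b)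
-- 	return (allele_b, allele_a)
--
-- def _autosomal_child_genotypes(
-- 	parent_a: tuple,
-- 	parent_b: tuple,
-- ) -> set:
-- 	alleles_a = parent_a
-- 	alleles_b = parent_b
-- 	children: set = set()
-- 	for allele_a in alleles_a:
-- 		for allele_b in alleles_b:
-- 			children.add(_canonical_pair(allele_a, allele_b, AUTOSOMAL_ALLELES))
-- 	return children
--
-- def _autosomal_parent_possible(
-- 	parent_genotype: tuple,
-- 	other_parent_domain: list,
-- 	children_domains: list,
-- ) -> bool:
-- 	for child_domain in children_domains:
-- 		match_found = False
-- 		for other_genotype in other_parent_domain: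
-- 			if child_domain & _autosomal_child_genotypes(parent_genotype, other_genotype):
-- 				match_found = True
-- 				break
-- 		if not match_found:
-- 			return False
-- 	return True
-- ===== SOURCE B (Python) =====
-- def _autosomal_parent_possible(
-- 	parent_genotype: tuple,
-- 	other_parent_domain: list,
-- 	children_domains: list,
-- ) -> bool:
-- 	# Build the union of all reachable child genotypes once, then test each
-- 	# child domain against it in O(1) per genotype.
-- 	reachable = set()
-- 	for other_genotype in other_parent_domain:
-- 		for allele_b in other_genotype:
-- 			for allele_a in parent_genotype:
-- 				if allele_a <= allele_b:
-- 					reachable.add((allele_a, allele_b))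
-- 				else:
-- 					reachable.add((allele_b, allele_a))
-- 	return all(not reachable.isdisjoint(child_domain) for child_domain in children_domains)
-- ===== Notes on version B (the rewrite author's own statement) =====
-- stated objective: faster
-- what changed: Instead of recomputing the Punnett set of child genotypes for every (child, other-genotype) pair with early exit, B builds the union of all reachable child genotypes over the whole other-parent domain once and tests each child domain against that single set.
-- outside the precondition, e.g. on _autosomal_parent_possible(('a',), [('A',), ('x',)], [{('A', 'a')}]): A returns True, B returns True
import Mathlib
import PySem

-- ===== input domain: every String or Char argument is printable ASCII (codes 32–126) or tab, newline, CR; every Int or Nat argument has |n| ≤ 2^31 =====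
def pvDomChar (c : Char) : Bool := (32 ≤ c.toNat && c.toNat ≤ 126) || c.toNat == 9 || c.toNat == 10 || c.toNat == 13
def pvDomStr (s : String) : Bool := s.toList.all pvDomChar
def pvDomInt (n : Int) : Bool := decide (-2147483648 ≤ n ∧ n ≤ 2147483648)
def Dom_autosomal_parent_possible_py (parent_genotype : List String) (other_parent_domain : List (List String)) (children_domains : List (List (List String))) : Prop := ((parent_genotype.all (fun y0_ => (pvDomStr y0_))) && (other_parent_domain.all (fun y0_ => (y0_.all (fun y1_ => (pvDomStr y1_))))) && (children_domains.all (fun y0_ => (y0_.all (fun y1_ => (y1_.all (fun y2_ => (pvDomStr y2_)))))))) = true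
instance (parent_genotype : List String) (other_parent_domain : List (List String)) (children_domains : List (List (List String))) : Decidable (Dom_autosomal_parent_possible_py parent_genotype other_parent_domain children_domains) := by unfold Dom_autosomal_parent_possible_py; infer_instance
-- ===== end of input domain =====

-- B replaces A's per-(child, other-genotype) child-genotype-set recomputation with one
-- precomputed union of all reachable child genotypes, tested against each child domain
-- (objective: faster).


-- ===== PORT A =====
-- _canonical_pair with allele_order = AUTOSOMAL_ALLELES = ('A', 'a').
-- order_map[..] raises KeyError on an allele outside {'A','a'} (when the two alleles differ);
-- Pre_ excludes every input that can reach such a lookup, so the getD default 0 is never used.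
def pvCanonicalPair (allele_a allele_b : String) : List String :=
  if allele_a == allele_b then [allele_a, allele_b]
  else
    let order_map : PySem.Dict String Int :=
      (PySem.Dict.empty.insert "A" 0).insert "a" 1
    if order_map.getD allele_a 0 ≤ order_map.getD allele_b 0 then [allele_a, allele_b]
    else [allele_b, allele_a]

def pvChildGenotypes (parent_a parent_b : List String) : PySem.Set (List String) :=
  parent_a.foldl
    (fun children allele_a =>
      parent_b.foldl (fun children allele_b =>
        PySem.Set.add children (pvCanonicalPair allele_a allele_b)) children)
    PySem.Set.empty

-- the inner 'for other_genotype in other_parent_domain: … match_found = True; break' loop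
def pvMatchFound (parent_genotype : List String) (child_domain : List (List String)) (other_parent_domain : List (List String)) : Bool :=
  match other_parent_domain with
  | [] => false
  | other_genotype :: rest =>
    if !(PySem.Set.inter child_domain (pvChildGenotypes parent_genotype other_genotype)).isEmpty then
      true
    else pvMatchFound parent_genotype child_domain rest

def autosomal_parent_possible_py (parent_genotype : List String) (other_parent_domain : List (List String)) (children_domains : List (List (List String))) : Bool :=
  match children_domains with
  | [] => true
  | child_domain :: rest =>
    if !(pvMatchFound parent_genotype child_domain other_parent_domain) then false
    else autosomal_parent_possible_py parent_genotype other_parent_domain rest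

-- ===== PORT B =====
def pvMinMaxPair (allele_a allele_b : String) : List String :=
  if allele_a ≤ allele_b then [allele_a, allele_b] else [allele_b, allele_a]

def pvReachable (parent_genotype : List String) (other_parent_domain : List (List String)) : PySem.Set (List String) :=
  other_parent_domain.foldl
    (fun s other_genotype =>
      other_genotype.foldl
        (fun s allele_b =>
          parent_genotype.foldl (fun s allele_a => PySem.Set.add s (pvMinMaxPair allele_a allele_b)) s)
        s)
    PySem.Set.empty

def autosomal_parent_possible_py_alt (parent_genotype : List String) (other_parent_domain : List (List String)) (children_domains : List (List (List String))) : Bool :=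
  let reachable := pvReachable parent_genotype other_parent_domain
  children_domains.all (fun child_domain => !(PySem.Set.isdisjoint reachable child_domain))

-- ===== PRECONDITION & SPEC =====
-- Pre_ excludes the inputs on which A's order_map lookup can raise KeyError: some parent allele
-- paired with some other-parent allele where the two differ and are not both 'A'/'a'. On part of
-- these A still returns, by breaking out of its scan before reaching the offending pair; B
-- returns the same value on all of them (its extra pairs only ever sit in genotype sets A never
-- built), so the exclusion is purely to keep Pre_ a closed form — see the cites.
def Pre_autosomal_parent_possible_py (parent_genotype : List String) (other_parent_domain : List (List String)) (children_domains : List (List (List String))) : Prop :=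
  children_domains = [] ∨
    (∀ p ∈ parent_genotype, ∀ g ∈ other_parent_domain, ∀ o ∈ g,
      p = o ∨ ((p = "A" ∨ p = "a") ∧ (o = "A" ∨ o = "a")))
instance (parent_genotype : List String) (other_parent_domain : List (List String)) (children_domains : List (List (List String))) : Decidable (Pre_autosomal_parent_possible_py parent_genotype other_parent_domain children_domains) := by unfold Pre_autosomal_parent_possible_py; infer_instance

def pvWitness_autosomal_parent_possible_py : List String × List (List String) × List (List (List String)) :=
  (["A", "a"], [["A", "A"]], [[["A", "A"]]])

def Spec_autosomal_parent_possible_py (parent_genotype : List String) (other_parent_domain : List (List String)) (children_domains : List (List (List String))) (out : Bool) : Prop := out = autosomal_parent_possible_py_alt parent_genotype other_parent_domain children_domains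
instance (parent_genotype : List String) (other_parent_domain : List (List String)) (children_domains : List (List (List String))) (out : Bool) : Decidable (Spec_autosomal_parent_possible_py parent_genotype other_parent_domain children_domains out) := by unfold Spec_autosomal_parent_possible_py; infer_instance

-- ===== CLAIM (what is proved, stated in full; the proofs are below) =====
def Claim_equal_autosomal_parent_possible_py : Prop := ∀ (parent_genotype : List String) (other_parent_domain : List (List String)) (children_domains : List (List (List String))), Dom_autosomal_parent_possible_py parent_genotype other_parent_domain children_domains → Pre_autosomal_parent_possible_py parent_genotype other_parent_domain children_domains → Spec_autosomal_parent_possible_py parent_genotype other_parent_domain children_domains (autosomal_parent_possible_py parent_genotype other_parent_domain children_domains)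

-- ===== LEMMAS AND PROOFS =====

-- membership in a Set built by a doubly nested fold of adds
theorem mem_foldl_add2 {α β γ : Type} [BEq γ] [LawfulBEq γ] (f : α → β → γ) (la : List α) (lb : List β) (s : PySem.Set γ) (x : γ) :
    x ∈ la.foldl (fun s a => lb.foldl (fun s b => PySem.Set.add s (f a b)) s) s ↔
      x ∈ s ∨ ∃ a ∈ la, ∃ b ∈ lb, x = f a b := by
  induction la generalizing s with
  | nil => simp
  | cons a la ih => simp [ih, PySem.Set.mem_foldl_add]; exact or_assoc

-- membership in a Set built by B's triply nested fold (middle list drawn from the outer element)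
theorem mem_foldl_add3 {β γ δ : Type} [BEq δ] [LawfulBEq δ] (f : γ → β → δ) (la : List (List β)) (lc : List γ) (s : PySem.Set δ) (x : δ) :
    x ∈ la.foldl (fun s b' => b'.foldl (fun s b => lc.foldl (fun s c => PySem.Set.add s (f c b)) s) s) s ↔
      x ∈ s ∨ ∃ b' ∈ la, ∃ b ∈ b', ∃ c ∈ lc, x = f c b := by
  induction la generalizing s with
  | nil => simp
  | cons b' la ih => simp [ih, mem_foldl_add2 (fun b c => f c b)]; exact or_assoc

theorem mem_pvChildGenotypes (pa pb : List String) (x : List String) :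
    x ∈ pvChildGenotypes pa pb ↔ ∃ a ∈ pa, ∃ b ∈ pb, x = pvCanonicalPair a b := by
  unfold pvChildGenotypes
  rw [mem_foldl_add2]
  simp [PySem.Set.empty]

theorem mem_pvReachable (pg : List String) (od : List (List String)) (x : List String) :
    x ∈ pvReachable pg od ↔ ∃ g ∈ od, ∃ o ∈ g, ∃ p ∈ pg, x = pvMinMaxPair p o := by
  unfold pvReachable
  rw [mem_foldl_add3]
  simp [PySem.Set.empty]

theorem pvMatchFound_iff (pg : List String) (cd : List (List String)) (od : List (List String)) :
    pvMatchFound pg cd od = true ↔ ∃ g ∈ od, ∃ x ∈ cd, x ∈ pvChildGenotypes pg g := by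
  induction od with
  | nil => simp [pvMatchFound]
  | cons g rest ih =>
    have hb : (!(PySem.Set.inter cd (pvChildGenotypes pg g)).isEmpty) = true ↔
        ∃ x ∈ cd, x ∈ pvChildGenotypes pg g := by
      rw [Bool.not_eq_eq_eq_not, Bool.not_true, List.isEmpty_eq_false_iff_exists_mem]
      simp [PySem.Set.mem_inter]
    simp only [pvMatchFound, List.mem_cons]
    by_cases h : (!(PySem.Set.inter cd (pvChildGenotypes pg g)).isEmpty) = true
    · rw [if_pos h]
      constructor
      · intro _
        obtain ⟨x, hx, hm⟩ := hb.mp h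
        exact ⟨g, Or.inl rfl, x, hx, hm⟩
      · intro _; rfl
    · rw [if_neg h, ih]
      constructor
      · rintro ⟨g', hg', hx⟩; exact ⟨g', Or.inr hg', hx⟩
      · rintro ⟨g', hg' | hg', hx⟩
        · exact absurd (hb.mpr (hg' ▸ hx)) h
        · exact ⟨g', hg', hx⟩

theorem autosomal_A_iff (pg : List String) (od : List (List String)) (cds : List (List (List String))) :
    autosomal_parent_possible_py pg od cds = true ↔ ∀ cd ∈ cds, pvMatchFound pg cd od = true := by
  induction cds with
  | nil => simp [autosomal_parent_possible_py]
  | cons cd rest ih =>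
    simp only [autosomal_parent_possible_py, List.mem_cons]
    by_cases h : pvMatchFound pg cd od = true
    · simp [h, ih]
    · simp [h]

theorem canonical_eq_minmax (p o : String)
    (h : p = o ∨ ((p = "A" ∨ p = "a") ∧ (o = "A" ∨ o = "a"))) :
    pvCanonicalPair p o = pvMinMaxPair p o := by
  rcases h with rfl | ⟨hp | hp, ho | ho⟩ <;> subst_vars <;>
    simp [pvCanonicalPair, pvMinMaxPair] <;> decide

theorem autosomal_B_iff (pg : List String) (od : List (List String)) (cds : List (List (List String))) :
    autosomal_parent_possible_py_alt pg od cds = true ↔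
      ∀ cd ∈ cds, ∃ x ∈ pvReachable pg od, x ∈ cd := by
  simp only [autosomal_parent_possible_py_alt, List.all_eq_true,
    Bool.not_eq_eq_eq_not, Bool.not_true]
  refine forall_congr' fun cd => ?_
  refine imp_congr_right fun _ => ?_
  rw [Bool.eq_false_iff, ne_eq, PySem.Set.isdisjoint_iff]
  push Not
  rfl

-- ===== VERDICT (by name: the statement is the Claim_ definition above) =====
theorem autosomal_parent_possible_py_spec : Claim_equal_autosomal_parent_possible_py := by
  intro pg od cds _ hpre
  unfold Spec_autosomal_parent_possible_py
  rcases hpre with rfl | h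
  · rfl
  · rw [Bool.eq_iff_iff, autosomal_A_iff, autosomal_B_iff]
    refine forall_congr' fun cd => imp_congr_right fun _ => ?_
    rw [pvMatchFound_iff]
    constructor
    · rintro ⟨g, hg, x, hx, hm⟩
      rw [mem_pvChildGenotypes] at hm
      obtain ⟨p, hp, o, ho, rfl⟩ := hm
      refine ⟨pvMinMaxPair p o, ?_, ?_⟩
      · rw [mem_pvReachable]; exact ⟨g, hg, o, ho, p, hp, rfl⟩
      · rwa [← canonical_eq_minmax p o (h p hp g hg o ho)]
    · rintro ⟨x, hxr, hxcd⟩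
      rw [mem_pvReachable] at hxr
      obtain ⟨g, hg, o, ho, p, hp, rfl⟩ := hxr
      refine ⟨g, hg, pvMinMaxPair p o, hxcd, ?_⟩
      rw [mem_pvChildGenotypes]
      exact ⟨p, hp, o, ho, (canonical_eq_minmax p o (h p hp g hg o ho)).symm⟩
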